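-- pv_equiv track=rewrite | github.com/hannayangg/penwing | # ridi/78.py | F
-- ===== SOURCE A (Python) =====
-- def F(prices):
--   minp = prices[0]
--   res = 0
--   for i,v in enumerate(prices):
--     if i == 0: continue
--     if minp < v:
--       res += (v-minp)
--     minp = v
--   return res
-- ===== SOURCE B (Python) =====
-- def F(prices):
--     n = len(prices)
--     res = 0
--     i = 0
--     while i < n - 1:
--         # walk down (or flat) to a valley
--         while i < n - 1 and prices[i + 1] <= prices[i]:
--             i += 1
--         valley = prices[i]
--         # walk strictly up to a peak
--         while i < n - 1 and prices[i + 1] > prices[i]: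
--             i += 1
--         res += prices[i] - valley
--     return res
-- ===== Notes on version B (the rewrite author's own statement) =====
-- stated objective: alternative
-- what changed: Replaced the per-element fold that adds each positive consecutive difference with a peak-valley two-level while scan that advances an index to each valley and following peak and adds peak - valley once per ascent.
-- outside the precondition, e.g. on F([]): A raises IndexError, B returns 0
import Mathlib
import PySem

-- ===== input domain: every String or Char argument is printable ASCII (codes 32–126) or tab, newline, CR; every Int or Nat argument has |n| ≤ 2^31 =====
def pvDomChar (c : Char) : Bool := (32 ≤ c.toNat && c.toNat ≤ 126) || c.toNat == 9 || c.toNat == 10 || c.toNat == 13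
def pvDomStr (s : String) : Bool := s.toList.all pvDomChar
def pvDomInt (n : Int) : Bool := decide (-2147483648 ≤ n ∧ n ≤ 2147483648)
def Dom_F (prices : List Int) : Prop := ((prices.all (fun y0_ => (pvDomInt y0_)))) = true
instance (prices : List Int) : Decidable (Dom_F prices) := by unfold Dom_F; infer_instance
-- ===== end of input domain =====

-- B replaces A's fold over every consecutive difference by a peak-valley index scan; return values agree on nonempty lists (A raises IndexError on []).

-- ===== PORT A =====
-- loop body of A's 'for i,v in enumerate(prices)'
def stepA (s : Int × Int) (iv : Int × Int) : Int × Int :=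
  if iv.1 = 0 then s
  else (iv.2, if s.1 < iv.2 then s.2 + (iv.2 - s.1) else s.2)

def F (prices : List Int) : Int :=
  -- 'minp = prices[0]' raises IndexError on []; excluded by Pre_F (pyGetD used totally)
  ((PySem.List.enumerate prices).foldl stepA (PySem.List.pyGetD prices 0 0, 0)).2

-- ===== PORT B =====
-- inner 'while i < n-1 and prices[i+1] <= prices[i]: i += 1' (fuel = list length is a totality guard;
-- the loop advances i at each step, so length fuel always suffices)
def pvDesc (prices : List Int) : Nat → Nat → Nat
  | 0, i => i
  | f+1, i =>
    if i < prices.length - 1 ∧ prices.getD (i+1) 0 ≤ prices.getD i 0 then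
      pvDesc prices f (i+1)
    else i

-- inner 'while i < n-1 and prices[i+1] > prices[i]: i += 1'
def pvAsc (prices : List Int) : Nat → Nat → Nat
  | 0, i => i
  | f+1, i =>
    if i < prices.length - 1 ∧ prices.getD i 0 < prices.getD (i+1) 0 then
      pvAsc prices f (i+1)
    else i

-- outer 'while i < n-1' of B (fuel: each iteration strictly advances i, so length fuel suffices)
def pvLoop (prices : List Int) : Nat → Nat → Int → Int
  | 0, _, res => res
  | f+1, i, res =>
    if i < prices.length - 1 then
      let j := pvDesc prices prices.length i
      let k := pvAsc prices prices.length j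
      pvLoop prices f k (res + (prices.getD k 0 - prices.getD j 0))
    else res

def F_alt (prices : List Int) : Int := pvLoop prices prices.length 0 0

-- ===== PRECONDITION & SPEC =====
-- A raises IndexError on the empty list (prices[0]); that input is excluded.
def Pre_F (prices : List Int) : Prop := prices ≠ []
instance (prices : List Int) : Decidable (Pre_F prices) := by unfold Pre_F; infer_instance

def pvWitness_F : List Int := [7, 1, 5, 3, 6, 4]

def Spec_F (prices : List Int) (out : Int) : Prop := out = F_alt prices
instance (prices : List Int) (out : Int) : Decidable (Spec_F prices out) := by unfold Spec_F; infer_instance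

-- ===== CLAIM (what is proved, stated in full; the proofs are below) =====
def Claim_equal_F : Prop := ∀ (prices : List Int), Dom_F prices → Pre_F prices → Spec_F prices (F prices)

-- ===== LEMMAS AND PROOFS =====

-- sum of the positive consecutive differences of prices from index i on (fueled helper + wrapper)
def dsumF (prices : List Int) : Nat → Nat → Int
  | 0, _ => 0
  | f+1, i =>
    if i < prices.length - 1 then
      (if prices.getD i 0 < prices.getD (i+1) 0 then prices.getD (i+1) 0 - prices.getD i 0 else 0)
        + dsumF prices f (i+1)
    else 0

def dsum (prices : List Int) (i : Nat) : Int := dsumF prices (prices.length - i) i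

theorem dsum_unfold (prices : List Int) (i : Nat) :
    dsum prices i = if i < prices.length - 1 then
      (if prices.getD i 0 < prices.getD (i+1) 0 then prices.getD (i+1) 0 - prices.getD i 0 else 0)
        + dsum prices (i+1)
    else 0 := by
  by_cases hi : i < prices.length - 1
  · have hf : prices.length - i = (prices.length - (i+1)) + 1 := by omega
    rw [dsum, hf, dsumF, dsum, if_pos hi]
  · rw [if_neg hi, dsum]
    rcases hn : prices.length - i with _ | f
    · rfl
    · rw [dsumF, if_neg hi]

theorem pvDesc_ge (prices : List Int) : ∀ (f i : Nat), i ≤ pvDesc prices f i := by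
  intro f
  induction f with
  | zero => intro i; rfl
  | succ f ih =>
    intro i
    rw [pvDesc]
    split
    · exact le_trans (by omega) (ih (i+1))
    · rfl

theorem pvAsc_ge (prices : List Int) : ∀ (f i : Nat), i ≤ pvAsc prices f i := by
  intro f
  induction f with
  | zero => intro i; rfl
  | succ f ih =>
    intro i
    rw [pvAsc]
    split
    · exact le_trans (by omega) (ih (i+1))
    · rfl

-- a descending/flat stretch contributes nothing to dsum
theorem dsum_pvDesc (prices : List Int) : ∀ (f i : Nat),
    dsum prices (pvDesc prices f i) = dsum prices i := by
  intro f
  induction f with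
  | zero => intro i; rfl
  | succ f ih =>
    intro i
    rw [pvDesc]
    split
    · rename_i h
      rw [ih (i+1)]
      have hle : ¬ prices.getD i 0 < prices.getD (i+1) 0 := by omega
      conv_rhs => rw [dsum_unfold, if_pos h.1, if_neg hle]
      omega
    · rfl

-- an ascent telescopes to peak minus valley
theorem dsum_pvAsc (prices : List Int) : ∀ (f i : Nat),
    dsum prices i = (prices.getD (pvAsc prices f i) 0 - prices.getD i 0) + dsum prices (pvAsc prices f i) := by
  intro f
  induction f with
  | zero => intro i; simp [pvAsc]
  | succ f ih =>
    intro i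
    rw [pvAsc]
    split
    · rename_i h
      rw [dsum_unfold, if_pos h.1, if_pos h.2]
      have := ih (i+1)
      omega
    · omega

-- the body of the outer while strictly advances the index
theorem pvStep_gt (prices : List Int) (i : Nat) (h : i < prices.length - 1) :
    i < pvAsc prices prices.length (pvDesc prices prices.length i) := by
  have hd := pvDesc_ge prices prices.length i
  rcases Nat.lt_or_ge i (pvDesc prices prices.length i) with hlt | hge
  · exact lt_of_lt_of_le hlt (pvAsc_ge prices _ _)
  · have hji : pvDesc prices prices.length i = i := le_antisymm hge hd
    -- pvDesc stopped at i with positive fuel, so the descend condition fails at i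
    have hlen : 0 < prices.length := by omega
    obtain ⟨f, hf⟩ : ∃ f, prices.length = f + 1 := ⟨prices.length - 1, by omega⟩
    have hcond : ¬ (i < prices.length - 1 ∧ prices.getD (i+1) 0 ≤ prices.getD i 0) := by
      intro hc
      have h1 : pvDesc prices prices.length i = pvDesc prices f (i+1) := by
        rw [hf, pvDesc, if_pos hc]
      have := pvDesc_ge prices f (i+1)
      omega
    have hasc : prices.getD i 0 < prices.getD (i+1) 0 := by
      by_contra hn
      exact hcond ⟨h, by omega⟩
    have h2 : pvAsc prices prices.length i = pvAsc prices f (i+1) := by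
      rw [hf, pvAsc, if_pos ⟨h, hasc⟩]
    have := pvAsc_ge prices f (i+1)
    rw [hji]
    omega

theorem pvLoop_eq (prices : List Int) : ∀ (f i : Nat) (res : Int),
    prices.length - 1 ≤ f + i → pvLoop prices f i res = res + dsum prices i := by
  intro f
  induction f with
  | zero =>
    intro i res hfi
    rw [pvLoop, dsum_unfold, if_neg (by omega)]
    omega
  | succ f ih =>
    intro i res hfi
    rw [pvLoop]
    split
    · rename_i hi
      have hk := pvStep_gt prices i hi
      rw [ih _ _ (by omega)]
      have h1 := dsum_pvDesc prices prices.length i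
      have h2 := dsum_pvAsc prices prices.length (pvDesc prices prices.length i)
      omega
    · rename_i hi
      rw [dsum_unfold, if_neg hi]
      omega

-- A's loop after the skipped index 0: state (minp, res), structural on the remaining list
def goA (m r : Int) (xs : List Int) : Int :=
  match xs with
  | [] => r
  | v :: t => goA v (if m < v then r + (v - m) else r) t

theorem foldA (xs : List Int) : ∀ (s m r : Int), 1 ≤ s →
    ((PySem.List.enumerate xs s).foldl stepA (m, r)).2 = goA m r xs := by
  induction xs with
  | nil => intro s m r _; simp [PySem.List.enumerate_nil, goA]
  | cons v t ih =>
    intro s m r hs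
    rw [PySem.List.enumerate_cons]
    simp only [List.foldl_cons]
    have hs0 : ¬ (s = 0) := by omega
    rw [goA]
    have : stepA (m, r) (s, v) = (v, if m < v then r + (v - m) else r) := by
      simp [stepA, hs0]
    rw [this]
    exact ih (s+1) v _ (by omega)

theorem goA_dsum (prices : List Int) : ∀ (xs : List Int) (i : Nat) (r : Int),
    prices.drop (i+1) = xs → i < prices.length →
    goA (prices.getD i 0) r xs = r + dsum prices i := by
  intro xs
  induction xs with
  | nil =>
    intro i r hdrop hi
    have hlen : prices.length ≤ i + 1 := by
      by_contra hn
      have := List.drop_eq_nil_iff.mp hdrop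
      omega
    rw [goA, dsum_unfold, if_neg (by omega)]
    omega
  | cons v t ih =>
    intro i r hdrop hi
    have hv : prices[i+1]? = some v := by
      have h0 : (prices.drop (i+1))[0]? = some v := by rw [hdrop]; rfl
      simpa [List.getElem?_drop] using h0
    have hi1 : i + 1 < prices.length := by
      rcases List.getElem?_eq_some_iff.mp hv with ⟨h, _⟩
      exact h
    have hgd : prices.getD (i+1) 0 = v := by
      simp [List.getD, hv]
    have hdrop2 : prices.drop (i+2) = t := by
      have : prices.drop (i+2) = (prices.drop (i+1)).drop 1 := by
        rw [List.drop_drop]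
      rw [this, hdrop]
      simp
    rw [goA, dsum_unfold, if_pos (show i < prices.length - 1 by omega), hgd]
    have := ih (i+1) (if prices.getD i 0 < v then r + (v - prices.getD i 0) else r) hdrop2 hi1
    rw [hgd] at this
    rw [this]
    split_ifs <;> omega

theorem F_eq_dsum (prices : List Int) (h : prices ≠ []) : F prices = dsum prices 0 := by
  obtain ⟨x, rest, rfl⟩ := List.exists_cons_of_ne_nil h
  rw [F, PySem.List.enumerate_cons]
  simp only [List.foldl_cons]
  have hget : PySem.List.pyGetD (x :: rest) 0 0 = x := by
    simp [pysem]
  rw [hget]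
  have hstep : stepA (x, 0) (0, x) = (x, 0) := by simp [stepA]
  rw [hstep, foldA rest (0+1) x 0 (by omega)]
  have := goA_dsum (x :: rest) rest 0 0 (by simp) (by simp)
  simpa using this

-- ===== VERDICT (by name: the statement is the Claim_ definition above) =====
theorem F_spec : Claim_equal_F := by
  intro prices _ hpre
  unfold Spec_F F_alt
  rw [pvLoop_eq prices prices.length 0 0 (by omega), F_eq_dsum prices hpre]
  omega
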